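-- pv_equiv track=rewrite | github.com/Vishnuvikas56/automateprint | backend/smart_scheduler.py | order_combinations
-- ===== SOURCE A (Python) =====
-- from itertools import combinations
--
-- def order_combinations(order_type_supported: list, printers_data: dict):
--     """Generate default priority map for all combinations"""
--     result = {}
--     n = len(order_type_supported)
--
--     for r in range(1, n + 1):
--         for combo in combinations(order_type_supported, r):
--             key = ",".join(sorted(combo))
--             ranked_printers = []
--
--             for printer, pdata in printers_data.items():
--                 if not isinstance(pdata, dict) or 'supported' not in pdata:
--                     continue
--
--                 supported = pdata['supported']
--                 if all(c in supported for c in combo):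
--                     extras = len(supported) - len(combo)
--                     ranked_printers.append((extras, printer))
--
--             ranked_printers.sort(key=lambda x: (x[0], x[1]))
--             result[key] = [printer for _, printer in ranked_printers]
--
--     return result
-- ===== SOURCE B (Python) =====
-- from itertools import combinations
--
-- def order_combinations(order_type_supported: list, printers_data: dict):
--     """Inverted index: distribute each printer once over the index-subsets it supports,
--     then read each combination's ranked list off the index."""
--     n = len(order_type_supported)
--     buckets = {}
--     for printer, pdata in printers_data.items():
--         if not isinstance(pdata, dict) or 'supported' not in pdata:
--             continue
--         supported = pdata['supported']
--         idxs = [i for i in range(n) if order_type_supported[i] in supported]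
--         subs = [()]
--         for i in idxs:
--             subs = subs + [s + (i,) for s in subs]
--         for s in subs:
--             if s:
--                 buckets[s] = buckets.get(s, []) + [(len(supported) - len(s), printer)]
--     result = {}
--     for r in range(1, n + 1):
--         for combo_idx in combinations(range(n), r):
--             key = ",".join(sorted(order_type_supported[i] for i in combo_idx))
--             ranked = sorted(buckets.get(combo_idx, []), key=lambda x: (x[0], x[1]))
--             result[key] = [printer for _, printer in ranked]
--     return result
-- ===== Notes on version B (the rewrite author's own statement) =====
-- stated objective: alternative
-- what changed: Inverts the loop nesting: instead of re-scanning every printer for each of the 2^n-1 combinations, B iterates the printers once, distributing each printer into buckets for every index-subset of order types it supports, and each combination then just reads (and sorts) its bucket.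
import Mathlib
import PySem

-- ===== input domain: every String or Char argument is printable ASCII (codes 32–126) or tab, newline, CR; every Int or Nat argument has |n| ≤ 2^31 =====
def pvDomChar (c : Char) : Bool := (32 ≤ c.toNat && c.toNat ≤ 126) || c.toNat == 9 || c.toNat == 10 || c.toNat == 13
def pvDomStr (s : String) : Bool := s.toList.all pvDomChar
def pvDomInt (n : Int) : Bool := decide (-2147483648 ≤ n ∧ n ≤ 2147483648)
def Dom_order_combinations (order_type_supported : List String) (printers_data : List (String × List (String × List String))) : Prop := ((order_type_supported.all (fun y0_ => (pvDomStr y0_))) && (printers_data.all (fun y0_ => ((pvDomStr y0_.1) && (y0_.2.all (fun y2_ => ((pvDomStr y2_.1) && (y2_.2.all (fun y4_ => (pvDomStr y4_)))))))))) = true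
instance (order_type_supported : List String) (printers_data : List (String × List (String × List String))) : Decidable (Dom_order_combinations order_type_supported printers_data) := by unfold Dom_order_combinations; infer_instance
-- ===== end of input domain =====

-- B inverts the loop nesting: each printer is distributed ONCE over the index-subsets it supports
-- (an inverted printer→combination index), and each combination then reads its ranked list off that
-- index instead of re-scanning all printers; objective: alternative decomposition, same results.

-- ===== PORT A =====
-- itertools.combinations(xs, r): r-combinations in lexicographic-by-index order
def pvCombs {α : Type} : Nat → List α → List (List α)
  | 0, _ => [[]]
  | _ + 1, [] => []
  | r + 1, x :: xs => (pvCombs r xs).map (fun c => x :: c) ++ pvCombs (r + 1) xs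

def order_combinations (order_type_supported : List String) (printers_data : List (String × List (String × List String))) : List (String × List String) :=
  let pd := PySem.Dict.ofList printers_data
  let n : Int := PySem.List.len order_type_supported
  ((PySem.List.pyRange 1 (n + 1) 1).foldl (fun result r =>
    (pvCombs r.toNat order_type_supported).foldl (fun result combo =>
      let key := PySem.Str.join "," (PySem.List.sorted combo (fun x => x) false)
      let ranked := pd.items.foldl (fun acc pp =>
        match (PySem.Dict.ofList pp.2).get? "supported" with
        | none => acc
        | some supported =>
          if combo.all (fun c => supported.contains c) then
            acc ++ [((PySem.List.len supported - PySem.List.len combo : Int), pp.1)]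
          else acc) ([] : List (Int × String))
      let ranked := PySem.List.sorted2 ranked (fun x => x.1) (fun x => x.2) false
      result.insert key (ranked.map (fun x => x.2))) result)
    (PySem.Dict.empty : PySem.Dict String (List String))).items

-- ===== PORT B =====
def order_combinations_alt (order_type_supported : List String) (printers_data : List (String × List (String × List String))) : List (String × List String) :=
  let pd := PySem.Dict.ofList printers_data
  let n : Int := PySem.List.len order_type_supported
  let buckets := pd.items.foldl (fun buckets pp =>
    match (PySem.Dict.ofList pp.2).get? "supported" with
    | none => buckets
    | some supported =>
      let idxs := (PySem.List.pyRange 0 n 1).filter (fun i => supported.contains (PySem.List.pyGetD order_type_supported i ""))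
      let subs := idxs.foldl (fun subs i => subs ++ subs.map (fun s => s ++ [i])) ([[]] : List (List Int))
      subs.foldl (fun buckets s =>
        if s ≠ [] then
          buckets.insert s (buckets.getD s [] ++ [((PySem.List.len supported - PySem.List.len s : Int), pp.1)])
        else buckets) buckets)
    (PySem.Dict.empty : PySem.Dict (List Int) (List (Int × String)))
  ((PySem.List.pyRange 1 (n + 1) 1).foldl (fun result r =>
    (pvCombs r.toNat (PySem.List.pyRange 0 n 1)).foldl (fun result c =>
      let key := PySem.Str.join "," (PySem.List.sorted (c.map (fun i => PySem.List.pyGetD order_type_supported i "")) (fun x => x) false)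
      let ranked := PySem.List.sorted2 (buckets.getD c []) (fun x => x.1) (fun x => x.2) false
      result.insert key (ranked.map (fun x => x.2))) result)
    (PySem.Dict.empty : PySem.Dict String (List String))).items

-- ===== PRECONDITION & SPEC =====
def Spec_order_combinations (order_type_supported : List String) (printers_data : List (String × List (String × List String))) (out : List (String × List String)) : Prop := out = order_combinations_alt order_type_supported printers_data
instance (order_type_supported : List String) (printers_data : List (String × List (String × List String))) (out : List (String × List String)) : Decidable (Spec_order_combinations order_type_supported printers_data out) := by unfold Spec_order_combinations; infer_instance

-- ===== CLAIM (what is proved, stated in full; the proofs are below) =====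
def Claim_equal_order_combinations : Prop := ∀ (order_type_supported : List String) (printers_data : List (String × List (String × List String))), Dom_order_combinations order_type_supported printers_data → Spec_order_combinations order_type_supported printers_data (order_combinations order_type_supported printers_data)

-- ===== LEMMAS AND PROOFS =====

-- pvCombs commutes with map
theorem pvCombs_map {α β : Type} (f : α → β) : ∀ (r : Nat) (l : List α),
    pvCombs r (l.map f) = (pvCombs r l).map (List.map f)
  | 0, _ => by simp [pvCombs]
  | r + 1, [] => by simp [pvCombs]
  | r + 1, x :: xs => by
    simp only [List.map_cons, pvCombs, pvCombs_map f r xs, pvCombs_map f (r+1) xs, List.map_append,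
      List.map_map]
    rfl


-- members of pvCombs r l are length-r sublists of l
theorem sublist_of_mem_pvCombs {α : Type} : ∀ (r : Nat) (l : List α) (c : List α),
    c ∈ pvCombs r l → c.Sublist l ∧ c.length = r
  | 0, l, c => by
    intro h; simp [pvCombs] at h; subst h; simp
  | r + 1, [], c => by intro h; simp [pvCombs] at h
  | r + 1, x :: xs, c => by
    intro h
    simp only [pvCombs, List.mem_append, List.mem_map] at h
    rcases h with ⟨t, ht, rfl⟩ | h
    · obtain ⟨hs, hl⟩ := sublist_of_mem_pvCombs r xs t ht
      exact ⟨List.Sublist.cons₂ x hs, by simp [hl]⟩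
    · obtain ⟨hs, hl⟩ := sublist_of_mem_pvCombs (r + 1) xs c h
      exact ⟨hs.cons x, hl⟩


-- a pairwise-< list that is a subset of a pairwise-< list is a sublist
theorem sublist_of_subset_of_pairwise_lt : ∀ (l c : List Int), c.Pairwise (· < ·) → l.Pairwise (· < ·) →
    (∀ x ∈ c, x ∈ l) → c.Sublist l
  | l, [] => by intro _ _ _; simp
  | [], i :: c => by intro _ _ h; exact absurd (h i (by simp)) (by simp)
  | y :: l', i :: c => by
    intro hc hl h
    by_cases hiy : i = y
    · subst hiy
      refine List.Sublist.cons₂ i (sublist_of_subset_of_pairwise_lt l' c hc.of_cons hl.of_cons ?_)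
      intro x hx
      have hxl : x ∈ i :: l' := h x (by simp [hx])
      have hix : i < x := (List.pairwise_cons.mp hc).1 x hx
      rcases List.mem_cons.mp hxl with rfl | hx' 
      · omega
      · exact hx'
    · refine (sublist_of_subset_of_pairwise_lt l' (i :: c) hc hl.of_cons ?_).cons y
      intro x hx
      have hxl := h x hx
      rcases List.mem_cons.mp hxl with rfl | hx'
      · -- x = y ∈ i :: c, i ≠ y so y ∈ c, so i < y; but i ∈ y :: l', i ≠ y so i ∈ l', so y < i
        rcases List.mem_cons.mp hx with rfl | hyc
        · exact absurd rfl hiy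
        · have h1 : i < x := (List.pairwise_cons.mp hc).1 x hyc
          have hil : i ∈ x :: l' := h i (by simp)
          rcases List.mem_cons.mp hil with rfl | hil'
          · omega
          · have h2 : x < i := (List.pairwise_cons.mp hl).1 i hil'
            omega
      · exact hx'


-- the doubling fold enumerates exactly the sublists of l
theorem mem_subsFold (l : List Int) (c : List Int) :
    c ∈ l.foldl (fun subs i => subs ++ subs.map (fun s => s ++ [i])) ([[]] : List (List Int)) ↔ c.Sublist l := by
  induction l using List.reverseRecOn generalizing c with
  | nil => simp
  | append_singleton l x ih =>
    rw [List.foldl_append]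
    simp only [List.foldl_cons, List.foldl_nil, List.mem_append, List.mem_map, ih]
    constructor
    · rintro (h | ⟨t, ht, rfl⟩)
      · exact h.trans (by simp)
      · exact List.Sublist.append ht (List.Sublist.refl [x])
    · intro h
      rw [List.sublist_append_iff] at h
      obtain ⟨l1, l2, rfl, h1, h2⟩ := h
      rcases List.sublist_singleton.mp h2 with rfl | rfl
      · left; simpa using h1
      · right; exact ⟨l1, h1, rfl⟩


theorem nodup_subsFold (l : List Int) (hl : l.Nodup) :
    (l.foldl (fun subs i => subs ++ subs.map (fun s => s ++ [i])) ([[]] : List (List Int))).Nodup := by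
  induction l using List.reverseRecOn with
  | nil => simp
  | append_singleton l x ih =>
    have hl' : l.Nodup := (List.nodup_append.mp hl).1
    have hx : x ∉ l := fun hxl => (List.nodup_append.mp hl).2.2 x hxl x (by simp) rfl
    rw [List.foldl_append]
    simp only [List.foldl_cons, List.foldl_nil]
    refine List.Nodup.append (ih hl') ((ih hl').map ?_) ?_
    · intro a b hab; simpa using hab
    · intro s hs hs2
      simp only [List.mem_map] at hs2
      obtain ⟨t, ht, rfl⟩ := hs2
      have : (t ++ [x]).Sublist l := (mem_subsFold l _).mp hs
      exact hx (this.subset (by simp))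


-- the subset-distribution fold: keys other than those in S are untouched
theorem getD_subins_not_mem (S : List (List Int)) (d : PySem.Dict (List Int) (List (Int × String)))
    (v : List Int → (Int × String)) (c : List Int) (hc : c ∉ S) :
    (S.foldl (fun d s => if s ≠ [] then d.insert s (d.getD s [] ++ [v s]) else d) d).getD c []
      = d.getD c [] := by
  induction S generalizing d with
  | nil => rfl
  | cons s S ih =>
    simp only [List.foldl_cons]
    rw [ih _ (fun h => hc (by simp [h]))]
    split_ifs with h
    · rw [PySem.Dict.getD_insert]
      simp only [List.mem_cons, not_or] at hc
      simp [hc.1]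
    · rfl


theorem getD_subins_mem (S : List (List Int)) (d : PySem.Dict (List Int) (List (Int × String)))
    (v : List Int → (Int × String)) (c : List Int) (hne : c ≠ []) (hmem : c ∈ S) (hnd : S.Nodup) :
    (S.foldl (fun d s => if s ≠ [] then d.insert s (d.getD s [] ++ [v s]) else d) d).getD c []
      = d.getD c [] ++ [v c] := by
  induction S generalizing d with
  | nil => simp at hmem
  | cons s S ih =>
    simp only [List.foldl_cons]
    rcases List.mem_cons.mp hmem with rfl | hcS
    · have hcS : c ∉ S := (List.nodup_cons.mp hnd).1
      rw [getD_subins_not_mem S _ v c hcS]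
      rw [if_pos hne, PySem.Dict.getD_insert]
      simp
    · rw [ih _ hcS (List.nodup_cons.mp hnd).2]
      split_ifs with h
      · rw [PySem.Dict.getD_insert]
        have : c ≠ s := fun he => (List.nodup_cons.mp hnd).1 (he ▸ hcS)
        simp [this]
      · rfl


-- the bucket of combination c equals A's (pre-sort) ranked list for the value combination c.map get
theorem bucket_eq_ranked (ots : List String) (ps : List (String × List (String × List String)))
    (c : List Int) (hc : c.Sublist (PySem.List.pyRange 0 (PySem.List.len ots) 1)) (hne : c ≠ []) :
    (ps.foldl (fun buckets pp =>
      match (PySem.Dict.ofList pp.2).get? "supported" with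
      | none => buckets
      | some supported =>
        let idxs := (PySem.List.pyRange 0 (PySem.List.len ots) 1).filter (fun i => supported.contains (PySem.List.pyGetD ots i ""))
        let subs := idxs.foldl (fun subs i => subs ++ subs.map (fun s => s ++ [i])) ([[]] : List (List Int))
        subs.foldl (fun buckets s =>
          if s ≠ [] then
            buckets.insert s (buckets.getD s [] ++ [((PySem.List.len supported - PySem.List.len s : Int), pp.1)])
          else buckets) buckets)
      (PySem.Dict.empty : PySem.Dict (List Int) (List (Int × String)))).getD c []
    = ps.foldl (fun acc pp =>
        match (PySem.Dict.ofList pp.2).get? "supported" with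
        | none => acc
        | some supported =>
          if (c.map (fun i => PySem.List.pyGetD ots i "")).all (fun v => supported.contains v) then
            acc ++ [((PySem.List.len supported - PySem.List.len (c.map (fun i => PySem.List.pyGetD ots i "")) : Int), pp.1)]
          else acc) ([] : List (Int × String)) := by
  induction ps using List.reverseRecOn with
  | nil => rfl
  | append_singleton ps pp ih =>
    rw [List.foldl_append, List.foldl_append]
    simp only [List.foldl_cons, List.foldl_nil]
    cases hsup : (PySem.Dict.ofList pp.2).get? "supported" with
    | none => exact ih
    | some supported =>
      simp only
      set idxs := (PySem.List.pyRange 0 (PySem.List.len ots) 1).filter (fun i => supported.contains (PySem.List.pyGetD ots i "")) with hidxs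
      have hnd : idxs.Nodup := (PySem.List.nodup_pyRange_one 0 _).filter _
      have hcond : c.Sublist idxs ↔ ((c.map (fun i => PySem.List.pyGetD ots i "")).all (fun v => supported.contains v) = true) := by
        rw [List.all_eq_true]
        constructor
        · intro hs v hv
          rw [List.mem_map] at hv
          obtain ⟨i, hi, rfl⟩ := hv
          have := hs.subset hi
          rw [hidxs, List.mem_filter] at this
          exact this.2
        · intro hall
          refine sublist_of_subset_of_pairwise_lt idxs c
            ((PySem.List.pairwise_lt_pyRange_one 0 _).sublist hc)
            ((PySem.List.pairwise_lt_pyRange_one 0 _).filter _) ?_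
          intro i hi
          rw [hidxs, List.mem_filter]
          exact ⟨hc.subset hi, hall _ (List.mem_map_of_mem hi)⟩
      by_cases hmem : c.Sublist idxs
      · rw [getD_subins_mem _ _ _ c hne ((mem_subsFold idxs c).mpr hmem) (nodup_subsFold idxs hnd), ih]
        rw [if_pos (hcond.mp hmem)]
        simp [PySem.List.len]
      · rw [getD_subins_not_mem _ _ _ c (fun h => hmem ((mem_subsFold idxs c).mp h)), ih]
        rw [if_neg (fun h => hmem (hcond.mpr h))]


-- ===== VERDICT (by name: the statement is the Claim_ definition above) =====
theorem order_combinations_spec : Claim_equal_order_combinations := by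
  intro ots pdl _
  unfold Spec_order_combinations order_combinations order_combinations_alt
  simp only []
  congr 1
  apply PySem.List.foldl_congr_mem
  intro result r hr
  have hr1 : (1 : Int) ≤ r := (PySem.List.mem_pyRange_one.mp hr).1
  have hots : ots = (PySem.List.pyRange 0 (PySem.List.len ots) 1).map (fun i => PySem.List.pyGetD ots i "") :=
    (PySem.List.map_pyGetD_pyRange_zero ots "").symm
  conv_lhs => rw [hots, pvCombs_map]
  rw [List.foldl_map]
  apply PySem.List.foldl_congr_mem
  intro acc c hcmem
  obtain ⟨hsub, hlen⟩ := sublist_of_mem_pvCombs _ _ _ hcmem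
  have hne : c ≠ [] := by
    intro h
    rw [h] at hlen
    simp at hlen
    omega
  rw [bucket_eq_ranked ots _ c hsub hne]
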